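-- pv_equiv track=rewrite | github.com/jhschwartz/dimerDB | scripts/derive_all_possible_homodimers.py | group_chains
-- ===== SOURCE A (Python) =====
-- import itertools
--
-- def group_chains(chains):
--     '''
--     Given a list of chains, each a string of the form "<pdb code>_a<assembly>_m<model>_c<chain>",
--     returns a list of lists, where each list is the chains of one pdb_code and one assembly.
--
--     So if we have chains ['1abc_a1_m1_cA', '1abc_a1_m1_cB', '1abc_a2_m1_cA', '7cba_a1_m1_cB', '1abc_a2_m1_cC'],
--     we should return [['1abc_a1_m1_cA', '1abc_a1_m1_cB'], ['1abc_a2_m1_cA', '1abc_a2_m1_cC'], ['7cba_B']]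
--
--     :param chains: list[str] a list of chains in pdb assemblies that correspond to a uniprot sequence
--     '''
--
--     chains = sorted(chains)
--
--     # 1abc_a1_m1_cA -> 1abca1
--     pdb_and_assembly = lambda fullname: ''.join(fullname.split('_')[:2])
--
--     group_result = itertools.groupby(chains, key=pdb_and_assembly)
--     result = []
--     for k, v in group_result:
--         result.append(list(v))
--     return result
-- ===== SOURCE B (Python) =====
-- def group_chains(chains):
--     groups = {}
--     for c in chains:
--         k = ''.join(c.split('_')[:2])
--         groups.setdefault(k, []).append(c)
--     out = [sorted(g) for g in groups.values()]
--     out.sort(key=lambda g: g[0])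
--     return out
-- ===== Notes on version B (the rewrite author's own statement) =====
-- stated objective: idiomatic
-- what changed: Replaces global-sort-then-itertools.groupby with a single-pass dict index keyed by pdb+assembly, then sorts each group and orders groups by their smallest member.
-- intended difference: On lists where two chains with the same pdb+assembly key have a chain of a different key sorting strictly between them (possible only for names off the documented <pdb>_a<assembly>_... format), A splits that key's chains into several output groups while B returns them as one group, which is the intended 'chains of one pdb_code and one assembly' grouping. — e.g. on group_chains(["a_b", "aa", "ab"]): A returns [["a_b"], ["aa"], ["ab"]], B returns [["a_b", "ab"], ["aa"]]
import Mathlib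
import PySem

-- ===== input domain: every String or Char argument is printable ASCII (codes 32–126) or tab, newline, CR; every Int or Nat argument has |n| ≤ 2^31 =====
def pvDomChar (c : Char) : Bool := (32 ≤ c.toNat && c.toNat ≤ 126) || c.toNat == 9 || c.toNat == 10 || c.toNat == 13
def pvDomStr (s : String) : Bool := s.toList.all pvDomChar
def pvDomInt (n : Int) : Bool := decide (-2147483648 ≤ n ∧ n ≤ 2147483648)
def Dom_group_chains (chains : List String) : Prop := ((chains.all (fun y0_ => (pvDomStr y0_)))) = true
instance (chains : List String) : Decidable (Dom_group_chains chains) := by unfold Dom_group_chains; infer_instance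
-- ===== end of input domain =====

-- B replaces sort+groupby with a one-pass dict index keyed by pdb+assembly followed by per-group
-- sorts, ordering groups by their smallest member (idiomatic; same asymptotic cost).

-- ===== PORT A =====
-- '' .join(fullname.split('_')[:2]); split? is total here since the separator "_" is non-empty
def pdbAndAssembly (fullname : String) : String :=
  PySem.Str.join "" (PySem.List.slice ((PySem.Str.split? fullname "_").getD []) none (some 2))

-- consuming itertools.groupby(chains, key=pdb_and_assembly) into a list of lists:
-- maximal consecutive runs of equal key
def groupbyRuns : List String → List (List String)
  | [] => []
  | x :: rest =>
    (x :: rest.takeWhile fun y => pdbAndAssembly y == pdbAndAssembly x) ::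
      groupbyRuns (rest.dropWhile fun y => pdbAndAssembly y == pdbAndAssembly x)
termination_by xs => xs.length
decreasing_by
  simp only [List.length_cons, Nat.lt_succ_iff]
  exact List.length_dropWhile_le _ _

def group_chains (chains : List String) : List (List String) :=
  groupbyRuns (PySem.List.sorted chains (fun x => x))

-- ===== PORT B =====
def group_chains_alt (chains : List String) : List (List String) :=
  let groups := chains.foldl
    (fun d c => d.modify (pdbAndAssembly c) [] (fun g => g ++ [c]))
    (PySem.Dict.empty : PySem.Dict String (List String))
  let out := groups.values.map (fun g => PySem.List.sorted g (fun x => x))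
  -- g[0]: every group is nonempty, so the getD default is never read
  PySem.List.sorted out (fun g => (PySem.List.pyGet? g 0).getD "")

-- ===== PRECONDITION & SPEC =====
-- On lists where two chains with the same pdb+assembly key have a chain of a different key sorting
-- strictly between them (names off the documented format), A splits that key's chains into several
-- groups while B returns them as one group, the intended 'one pdb code and one assembly' grouping.
-- (strLt is Python's str <)
def D_group_chains (chains : List String) : Prop :=
  ∃ a ∈ chains, ∃ c ∈ chains,
    pdbAndAssembly a = pdbAndAssembly c ∧ PySem.Chars.strLt a.toList c.toList = true ∧
    ∃ b ∈ chains, PySem.Chars.strLt a.toList b.toList = true ∧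
      PySem.Chars.strLt b.toList c.toList = true ∧ pdbAndAssembly b ≠ pdbAndAssembly a
instance (chains : List String) : Decidable (D_group_chains chains) := by
  unfold D_group_chains; infer_instance

def Spec_group_chains (chains : List String) (out : List (List String)) : Prop :=
  ¬ D_group_chains chains → out = group_chains_alt chains
instance (chains : List String) (out : List (List String)) : Decidable (Spec_group_chains chains out) := by
  unfold Spec_group_chains; infer_instance

def pvDiffWitness_group_chains : List String := ["a_b", "aa", "ab"]
def pvDiffWitnessOut_group_chains : (List (List String)) × (List (List String)) :=
  ([["a_b"], ["aa"], ["ab"]], [["a_b", "ab"], ["aa"]])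

-- ===== CLAIM (what is proved, stated in full; the proofs are below) =====
def Claim_unchanged_group_chains : Prop :=
  ∀ (chains : List String), Dom_group_chains chains → Spec_group_chains chains (group_chains chains)
def Claim_changed_group_chains : Prop :=
  Dom_group_chains (pvDiffWitness_group_chains) ∧ D_group_chains (pvDiffWitness_group_chains) ∧
  group_chains (pvDiffWitness_group_chains) = pvDiffWitnessOut_group_chains.1 ∧
  group_chains_alt (pvDiffWitness_group_chains) = pvDiffWitnessOut_group_chains.2 ∧
  pvDiffWitnessOut_group_chains.1 ≠ pvDiffWitnessOut_group_chains.2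

-- ===== LEMMAS AND PROOFS =====

-- contiguity of equal keys, as a membership statement
def Ctg (s : List String) : Prop :=
  ∀ a ∈ s, ∀ b ∈ s, ∀ c ∈ s,
    a < b → b < c → pdbAndAssembly a = pdbAndAssembly c → pdbAndAssembly b = pdbAndAssembly a

theorem ctg_of_subset {s t : List String} (hsub : ∀ x ∈ s, x ∈ t) (h : Ctg t) : Ctg s :=
  fun a ha b hb c hc => h a (hsub a ha) b (hsub b hb) c (hsub c hc)

theorem strLt_iff (s t : String) : PySem.Chars.strLt s.toList t.toList = true ↔ s < t := by
  rw [PySem.Chars.strLt, decide_eq_true_iff, String.lt_iff_toList_lt]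

theorem ctg_of_not_D {chains : List String} (h : ¬ D_group_chains chains) : Ctg chains := by
  intro a ha b hb c hc hab hbc hkey
  by_contra hne
  exact h ⟨a, ha, c, hc, hkey, (strLt_iff _ _).mpr (lt_trans hab hbc), b, hb,
    (strLt_iff _ _).mpr hab, (strLt_iff _ _).mpr hbc, hne⟩

-- Set.update over elements already present
theorem set_update_of_subset {l s : List String} (h : ∀ x ∈ l, x ∈ s) :
    PySem.Set.update s l = s := by
  induction l generalizing s with
  | nil => rfl
  | cons x l ih =>
    have hx : PySem.Set.contains s x = true := (PySem.Set.contains_iff s x).mpr (h x (by simp))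
    show PySem.Set.update (PySem.Set.add s x) l = s
    rw [PySem.Set.add, hx, if_pos rfl]
    exact ih (fun y hy => h y (by simp [hy]))

-- Set.update past a pinned head
theorem set_update_cons_of_not_mem {l s : List String} {a : String} (h : a ∉ l) :
    PySem.Set.update (a :: s) l = a :: PySem.Set.update s l := by
  induction l generalizing s with
  | nil => rfl
  | cons y l ih =>
    have hay : a ≠ y := fun e => h (by simp [e])
    have hnotl : a ∉ l := fun hl => h (by simp [hl])
    have hstep : PySem.Set.add (a :: s) y = a :: PySem.Set.add s y := by
      rw [PySem.Set.add, PySem.Set.add]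
      have hc : PySem.Set.contains (a :: s) y = PySem.Set.contains s y := by
        by_cases hy : y ∈ s
        · rw [(PySem.Set.contains_iff _ y).mpr hy, (PySem.Set.contains_iff _ y).mpr (by simp [hy])]
        · have h1 : ¬ y ∈ (a :: s) := by simp [hy, Ne.symm hay]
          have e1 : PySem.Set.contains (a :: s) y = false :=
            Bool.eq_false_iff.mpr (fun hcon => h1 ((PySem.Set.contains_iff _ y).mp hcon))
          have e2 : PySem.Set.contains s y = false :=
            Bool.eq_false_iff.mpr (fun hcon => hy ((PySem.Set.contains_iff s y).mp hcon))
          rw [e1, e2]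
      rw [hc]
      by_cases hy : PySem.Set.contains s y = true
      · rw [hy]; simp
      · rw [Bool.eq_false_iff.mpr hy]; simp
    show PySem.Set.update (PySem.Set.add (a :: s) y) l = a :: PySem.Set.update (PySem.Set.add s y) l
    rw [hstep]
    exact ih hnotl

-- every element of the dropWhile tail has a key different from the run key
theorem key_ne_of_mem_dropWhile {x : String} {rest : List String}
    (hpair : (x :: rest).Pairwise (· ≤ ·)) (hctg : Ctg (x :: rest)) :
    ∀ y ∈ rest.dropWhile (fun y => pdbAndAssembly y == pdbAndAssembly x),
      pdbAndAssembly y ≠ pdbAndAssembly x := by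
  intro y hy hkey
  set P := fun y => pdbAndAssembly y == pdbAndAssembly x with hP
  have hxle : ∀ z ∈ rest, x ≤ z := (List.pairwise_cons.mp hpair).1
  have hdsub : (rest.dropWhile P).Sublist rest := List.dropWhile_sublist P
  cases hd : rest.dropWhile P with
  | nil => rw [hd] at hy; exact absurd hy (List.not_mem_nil)
  | cons b r' =>
    have hbk : pdbAndAssembly b ≠ pdbAndAssembly x := by
      have w : rest.dropWhile P ≠ [] := by rw [hd]; exact List.cons_ne_nil _ _
      have hfalse := List.head_dropWhile_not P (l := rest) w
      have hb : (rest.dropWhile P).head w = b := by simp only [hd, List.head_cons]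
      rw [hb] at hfalse
      simpa [hP] using hfalse
    rw [hd] at hy
    rcases List.mem_cons.mp hy with rfl | hy'
    · exact hbk hkey
    · -- y strictly after b in the tail
      have hbmem : b ∈ rest := hdsub.mem (hd ▸ List.mem_cons_self)
      have hymem : y ∈ rest := hdsub.mem (hd ▸ List.mem_cons.mpr (Or.inr hy'))
      have hby : b ≤ y := by
        have hpd : (rest.dropWhile P).Pairwise (· ≤ ·) :=
          List.Pairwise.sublist hdsub (List.pairwise_cons.mp hpair).2
        rw [hd] at hpd
        exact (List.pairwise_cons.mp hpd).1 y hy'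
      have hbney : b ≠ y := fun e => hbk (e ▸ hkey)
      have hxneb : x ≠ b := fun e => hbk (congrArg pdbAndAssembly e.symm)
      have hxb : x < b := lt_of_le_of_ne (hxle b hbmem) hxneb
      have hbyt : b < y := lt_of_le_of_ne hby hbney
      exact hbk (hctg x List.mem_cons_self b (List.mem_cons_of_mem _ hbmem) y
        (List.mem_cons_of_mem _ hymem) hxb hbyt hkey.symm)

-- characterisation of A's runs on a sorted, contiguous list
theorem groupbyRuns_eq (s : List String) (hpair : s.Pairwise (· ≤ ·)) (hctg : Ctg s) :
    groupbyRuns s =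
      (PySem.List.dedup (s.map pdbAndAssembly)).map
        (fun k => s.filter (fun c => pdbAndAssembly c == k)) := by
  induction s using groupbyRuns.induct with
  | case1 => simp [groupbyRuns]
  | case2 x rest ih =>
    set K := pdbAndAssembly with hK
    set P := fun y => K y == K x with hP
    set t := rest.takeWhile P with ht
    set r := rest.dropWhile P with hr
    have hsplit : t ++ r = rest := List.takeWhile_append_dropWhile
    have htP : ∀ y ∈ t, K y = K x := fun y hy => by
      have := List.mem_takeWhile_imp hy; simpa [hP] using this
    have hrne : ∀ y ∈ r, K y ≠ K x := key_ne_of_mem_dropWhile hpair hctg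
    have hrsub : r.Sublist rest := List.dropWhile_sublist P
    -- head group is the whole filter class of K x
    have hfilt : (x :: rest).filter (fun c => K c == K x) = x :: t := by
      have e1 : t.filter (fun c => K c == K x) = t :=
        List.filter_eq_self.mpr (fun a ha => by simp [htP a ha])
      have e2 : r.filter (fun c => K c == K x) = [] :=
        List.filter_eq_nil_iff.mpr (fun a ha => by simp [hrne a ha])
      rw [← hsplit]
      simp only [List.filter_cons, List.filter_append, beq_self_eq_true,
        if_true, e1, e2, List.append_nil]
    -- the dedup of the keys splits off K x
    have hded : PySem.List.dedup ((x :: rest).map K) = K x :: PySem.List.dedup (r.map K) := by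
      have hmapsplit : (x :: rest).map K = K x :: (t.map K ++ r.map K) := by
        rw [← hsplit]; simp
      have hofcons : ∀ (a : String) (l : List String),
          PySem.Set.ofList (a :: l) = PySem.Set.update [a] l := by
        intro a l; rfl
      rw [PySem.List.dedup_eq_ofList, hmapsplit, hofcons]
      have h1 : PySem.Set.update ([K x] : PySem.Set String) (t.map K ++ r.map K)
          = PySem.Set.update (PySem.Set.update [K x] (t.map K)) (r.map K) := by
        simp [PySem.Set.update, List.foldl_append]
      have h2 : PySem.Set.update ([K x] : PySem.Set String) (t.map K) = [K x] :=
        set_update_of_subset (by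
          intro z hz
          rcases List.mem_map.mp hz with ⟨y, hy, rfl⟩
          simp [htP y hy])
      have h3 : PySem.Set.update ([K x] : PySem.Set String) (r.map K)
          = K x :: PySem.Set.update [] (r.map K) :=
        set_update_cons_of_not_mem (by
          intro hmem
          rcases List.mem_map.mp hmem with ⟨y, hy, he⟩
          exact hrne y hy he)
      rw [h1, h2, h3]
      rfl
    -- on keys of the tail, filtering the whole list equals filtering the tail
    have htail : ∀ k ∈ PySem.List.dedup (r.map K),
        (x :: rest).filter (fun c => K c == k) = r.filter (fun c => K c == k) := by
      intro k hk
      rcases List.mem_map.mp ((PySem.List.mem_dedup _ _).mp hk) with ⟨y, hy, rfl⟩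
      have hkx : K y ≠ K x := hrne y hy
      have e1 : t.filter (fun c => K c == K y) = [] :=
        List.filter_eq_nil_iff.mpr (fun a ha => by
          simp only [Bool.not_eq_true, beq_eq_false_iff_ne]
          rw [htP a ha]; exact fun e => hkx e.symm)
      rw [← hsplit]
      simp only [List.filter_cons, List.filter_append, e1, List.nil_append]
      rw [if_neg (by simp only [beq_iff_eq]; exact fun e => hkx e.symm)]
    have hpr : r.Pairwise (· ≤ ·) :=
      List.Pairwise.sublist hrsub (List.pairwise_cons.mp hpair).2
    have hcr : Ctg r := ctg_of_subset (fun z hz => List.mem_cons_of_mem _ (hrsub.mem hz)) hctg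
    rw [show groupbyRuns (x :: rest) = (x :: t) :: groupbyRuns r from by rw [groupbyRuns]]
    rw [hded, List.map_cons, hfilt, ih hpr hcr, List.map_congr_left htail]

-- each run is nonempty with a head drawn from s
theorem head_mem_of_mem_groupbyRuns {s : List String} {g : List String}
    (hg : g ∈ groupbyRuns s) : ∃ y t, g = y :: t ∧ y ∈ s := by
  induction s using groupbyRuns.induct with
  | case1 => simp [groupbyRuns] at hg
  | case2 x rest ih =>
    rw [show groupbyRuns (x :: rest) =
        (x :: rest.takeWhile fun y => pdbAndAssembly y == pdbAndAssembly x) ::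
          groupbyRuns (rest.dropWhile fun y => pdbAndAssembly y == pdbAndAssembly x)
      from by rw [groupbyRuns]] at hg
    rcases List.mem_cons.mp hg with rfl | hg'
    · exact ⟨x, _, rfl, List.mem_cons_self⟩
    · rcases ih hg' with ⟨y, t', rfl, hy⟩
      exact ⟨y, t', rfl, List.mem_cons_of_mem _ ((List.dropWhile_sublist _).mem hy)⟩

-- the heads of the runs are strictly increasing
theorem groupbyRuns_heads_lt (s : List String) (hpair : s.Pairwise (· ≤ ·)) (hctg : Ctg s) :
    (groupbyRuns s).Pairwise
      (fun g h => ((PySem.List.pyGet? g 0).getD "") < ((PySem.List.pyGet? h 0).getD "")) := by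
  induction s using groupbyRuns.induct with
  | case1 => rw [show groupbyRuns [] = [] from by rw [groupbyRuns]]; exact List.Pairwise.nil
  | case2 x rest ih =>
    set K := pdbAndAssembly with hK
    set P := fun y => K y == K x with hP
    set r := rest.dropWhile P with hr
    have hrne : ∀ y ∈ r, K y ≠ K x := key_ne_of_mem_dropWhile hpair hctg
    have hpr : r.Pairwise (· ≤ ·) :=
      List.Pairwise.sublist (List.dropWhile_sublist P) (List.pairwise_cons.mp hpair).2
    have hcr : Ctg r := ctg_of_subset
      (fun z hz => List.mem_cons_of_mem _ ((List.dropWhile_sublist P).mem hz)) hctg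
    rw [show groupbyRuns (x :: rest) = (x :: rest.takeWhile P) :: groupbyRuns r from by
      rw [groupbyRuns]]
    refine List.Pairwise.cons ?_ (ih hpr hcr)
    intro g hg
    rcases head_mem_of_mem_groupbyRuns hg with ⟨y, t', rfl, hy⟩
    have h1 : ((PySem.List.pyGet? (x :: rest.takeWhile P) 0).getD "") = x := by
      simp [PySem.List.pyGet?, PySem.List.pyIdx?]
    have h2 : ((PySem.List.pyGet? (y :: t') 0).getD "") = y := by
      simp [PySem.List.pyGet?, PySem.List.pyIdx?]
    rw [h1, h2]
    have hxle : x ≤ y := (List.pairwise_cons.mp hpair).1 y ((List.dropWhile_sublist P).mem hy)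
    have hxn : x ≠ y := fun e => hrne y hy (congrArg pdbAndAssembly e.symm)
    exact lt_of_le_of_ne hxle hxn

-- ===== VERDICT (by name: the statement is the Claim_ definition above) =====
-- filtering commutes with sorting (both sides are ≤-sorted lists of the same multiset)
theorem sorted_filter_comm (chains : List String) (p : String → Bool) :
    PySem.List.sorted (chains.filter p) (fun x => x)
      = (PySem.List.sorted chains (fun x => x)).filter p := by
  refine PySem.List.eq_of_perm_of_pairwise_le_of_injective (fun x => x)
    (fun a b h => h) ?_ ?_ ?_
  · exact (PySem.List.sorted_perm _ _ _).trans
      ((PySem.List.sorted_perm chains _ false).filter p).symm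
  · exact PySem.List.sorted_pairwise _ _
  · exact List.Pairwise.sublist List.filter_sublist (PySem.List.sorted_pairwise chains _)

theorem group_chains_spec : Claim_unchanged_group_chains := by
  intro chains _ hD
  set K := pdbAndAssembly with hKdef
  set s := PySem.List.sorted chains (fun x => x) with hs
  have hpair : s.Pairwise (· ≤ ·) := PySem.List.sorted_pairwise chains _
  have hmem : ∀ x, x ∈ s ↔ x ∈ chains := fun x => PySem.List.mem_sorted _ _ _ _
  have hctg : Ctg s :=
    ctg_of_subset (fun x hx => (hmem x).mp hx) (ctg_of_not_D hD)
  -- A's value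
  have hA : group_chains chains =
      (PySem.List.dedup (s.map K)).map (fun k => s.filter (fun c => K c == k)) :=
    groupbyRuns_eq s hpair hctg
  -- B's dictionary
  set d := chains.foldl
    (fun d c => d.modify (pdbAndAssembly c) [] (fun g => g ++ [c]))
    (PySem.Dict.empty : PySem.Dict String (List String)) with hd
  have hkeys : d.keys = PySem.List.dedup (chains.map K) := by
    rw [hd, PySem.Dict.keys_foldl_modify_key chains K [] (fun _ c => fun g => g ++ [c])
      PySem.Dict.empty]
    rfl
  have hnodup : d.keys.Nodup := by
    rw [hd]
    exact PySem.Dict.nodup_keys_foldl_modify_key chains K [] (fun _ c => fun g => g ++ [c])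
      PySem.Dict.empty List.nodup_nil
  have hgetD : ∀ k, d.getD k [] = chains.filter (fun c => K c == k) := by
    intro k
    have hfold : d = (chains.map (fun c => (K c, c))).foldl
        (fun d p => d.modify p.1 [] (fun g => g ++ [p.2])) PySem.Dict.empty := by
      rw [hd, List.foldl_map]
    rw [hfold, PySem.Dict.getD_foldl_modify_append]
    simp [List.filter_map, List.map_map, Function.comp_def]
  have hvals : d.values =
      (PySem.List.dedup (chains.map K)).map (fun k => chains.filter (fun c => K c == k)) := by
    rw [PySem.Dict.values_eq_map_keys d hnodup [], hkeys]
    exact List.map_congr_left (fun k _ => hgetD k)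
  -- B's list of sorted groups
  have hout : d.values.map (fun g => PySem.List.sorted g (fun x => x)) =
      (PySem.List.dedup (chains.map K)).map (fun k => s.filter (fun c => K c == k)) := by
    rw [hvals, List.map_map]
    exact List.map_congr_left (fun k _ => sorted_filter_comm chains _)
  -- the two key lists are permutations of each other
  have hkperm : (PySem.List.dedup (s.map K)).Perm (PySem.List.dedup (chains.map K)) := by
    rw [List.perm_ext_iff_of_nodup (PySem.List.nodup_dedup _) (PySem.List.nodup_dedup _)]
    intro k
    rw [PySem.List.mem_dedup, PySem.List.mem_dedup]
    constructor
    · intro hk; rcases List.mem_map.mp hk with ⟨y, hy, rfl⟩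
      exact List.mem_map.mpr ⟨y, (hmem y).mp hy, rfl⟩
    · intro hk; rcases List.mem_map.mp hk with ⟨y, hy, rfl⟩
      exact List.mem_map.mpr ⟨y, (hmem y).mpr hy, rfl⟩
  -- conclude: B's final sort reproduces A's run list
  show group_chains chains = group_chains_alt chains
  rw [group_chains_alt]
  simp only [← hd, hout]
  refine (PySem.List.sorted_eq_of_perm_of_pairwise_lt _ (group_chains chains) _ ?_ ?_).symm
  · rw [hA]; exact hkperm.map _
  · rw [hA, ← groupbyRuns_eq s hpair hctg]
    exact groupbyRuns_heads_lt s hpair hctg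

-- literal String `<` facts (core's String.decidableLT' does not kernel-reduce; go through toList)
theorem pvLt1 : ("a_b" : String) < "aa" := String.lt_iff_toList_lt.mpr (by decide)
theorem pvLt2 : ("aa" : String) < "ab" := String.lt_iff_toList_lt.mpr (by decide)
theorem pvLt3 : ("a_b" : String) < "ab" := String.lt_iff_toList_lt.mpr (by decide)

theorem group_chains_changed : Claim_changed_group_chains := by
  unfold Claim_changed_group_chains
  refine ⟨by decide, ?_, ?_, ?_, by decide⟩
  · decide
  · -- A's value on the witness
    have hsort : PySem.List.sorted ["a_b", "aa", "ab"] (fun x => x) = ["a_b", "aa", "ab"] :=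
      PySem.List.sorted_eq_of_perm_of_pairwise_lt _ _ _ (List.Perm.refl _) (by
        rw [List.pairwise_cons, List.pairwise_cons]
        refine ⟨?_, ?_, List.pairwise_singleton _ _⟩
        · intro a ha
          rcases List.mem_cons.mp ha with rfl | ha'
          · exact pvLt1
          · rw [List.mem_singleton.mp ha']; exact pvLt3
        · intro a ha; rw [List.mem_singleton.mp ha]; exact pvLt2)
    have c1 : (pdbAndAssembly "aa" == pdbAndAssembly "a_b") = false := by decide
    have c2 : (pdbAndAssembly "ab" == pdbAndAssembly "aa") = false := by decide
    have g0 : groupbyRuns [] = [] := by rw [groupbyRuns]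
    have g1 : groupbyRuns ["ab"] = [["ab"]] := by rw [groupbyRuns]; simp [g0]
    have g2 : groupbyRuns ["aa", "ab"] = [["aa"], ["ab"]] := by
      rw [groupbyRuns]; simp [c2, g1]
    have g3 : groupbyRuns ["a_b", "aa", "ab"] = [["a_b"], ["aa"], ["ab"]] := by
      rw [groupbyRuns]; simp [c1, g2]
    show group_chains ["a_b", "aa", "ab"] = [["a_b"], ["aa"], ["ab"]]
    rw [group_chains, hsort, g3]
  · -- B's value on the witness
    have hv : ((["a_b", "aa", "ab"].foldl
        (fun d c => d.modify (pdbAndAssembly c) [] (fun g => g ++ [c]))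
        (PySem.Dict.empty : PySem.Dict String (List String))).values)
        = [["a_b", "ab"], ["aa"]] := by decide
    have hs1 : PySem.List.sorted ["a_b", "ab"] (fun x => x) = ["a_b", "ab"] :=
      PySem.List.sorted_eq_of_perm_of_pairwise_lt _ _ _ (List.Perm.refl _) (by
        rw [List.pairwise_cons]
        exact ⟨fun a ha => by rw [List.mem_singleton.mp ha]; exact pvLt3,
          List.pairwise_singleton _ _⟩)
    have hs2 : PySem.List.sorted ["aa"] (fun x => x) = ["aa"] :=
      PySem.List.sorted_eq_of_perm_of_pairwise_lt _ _ _ (List.Perm.refl _)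
        (List.pairwise_singleton _ _)
    show group_chains_alt ["a_b", "aa", "ab"] = [["a_b", "ab"], ["aa"]]
    rw [group_chains_alt]
    simp only [hv, List.map_cons, List.map_nil, hs1, hs2]
    refine PySem.List.sorted_eq_of_perm_of_pairwise_lt _ _ _ (List.Perm.refl _) ?_
    rw [List.pairwise_cons]
    refine ⟨fun a ha => ?_, List.pairwise_singleton _ _⟩
    rw [List.mem_singleton.mp ha]
    have e1 : (PySem.List.pyGet? ["a_b", "ab"] 0).getD "" = "a_b" := by decide
    have e2 : (PySem.List.pyGet? ["aa"] 0).getD "" = "aa" := by decide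
    rw [e1, e2]
    exact pvLt1
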